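-- pv_equiv track=rewrite | github.com/KaixerRealNewAcc/dynastic-emerald | encounter_table_generator.py | aggregate_weighted_species
-- ===== SOURCE A (Python) =====
-- from typing import Dict, List, Any
--
-- def aggregate_weighted_species(
--     mons: List[Dict[str, Any]],
--     slot_weights: List[int]
-- ) -> Dict[str, float]:
--     """
--     Given a list of mons and a matching list of slot weights,
--     sum weights by species.
--     """
--     if len(mons) != len(slot_weights):
--         raise ValueError(
--             f"Length mismatch: {len(mons)} mons but {len(slot_weights)} weights."
--         )
--
--     species_weights: Dict[str, float] = {}
--     for m, w in zip(mons, slot_weights):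
--         sp = m["species"]
--         species_weights[sp] = species_weights.get(sp, 0) + w
--
--     return species_weights
-- ===== SOURCE B (Python) =====
-- def aggregate_weighted_species(mons, slot_weights):
--     if len(mons) != len(slot_weights):
--         raise ValueError(
--             f"Length mismatch: {len(mons)} mons but {len(slot_weights)} weights."
--         )
--     species = [m["species"] for m in mons]
--     return {sp: sum(w for s, w in zip(species, slot_weights) if s == sp)
--             for sp in dict.fromkeys(species)}
-- ===== Notes on version B (the rewrite author's own statement) =====
-- stated objective: alternative
-- what changed: Replaces the single-pass dict accumulation with a two-phase plan: extract the species list, dedupe it in first-occurrence order with dict.fromkeys, and compute each species' total by a per-species sum over the zipped (species, weight) pairs.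
import Mathlib
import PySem

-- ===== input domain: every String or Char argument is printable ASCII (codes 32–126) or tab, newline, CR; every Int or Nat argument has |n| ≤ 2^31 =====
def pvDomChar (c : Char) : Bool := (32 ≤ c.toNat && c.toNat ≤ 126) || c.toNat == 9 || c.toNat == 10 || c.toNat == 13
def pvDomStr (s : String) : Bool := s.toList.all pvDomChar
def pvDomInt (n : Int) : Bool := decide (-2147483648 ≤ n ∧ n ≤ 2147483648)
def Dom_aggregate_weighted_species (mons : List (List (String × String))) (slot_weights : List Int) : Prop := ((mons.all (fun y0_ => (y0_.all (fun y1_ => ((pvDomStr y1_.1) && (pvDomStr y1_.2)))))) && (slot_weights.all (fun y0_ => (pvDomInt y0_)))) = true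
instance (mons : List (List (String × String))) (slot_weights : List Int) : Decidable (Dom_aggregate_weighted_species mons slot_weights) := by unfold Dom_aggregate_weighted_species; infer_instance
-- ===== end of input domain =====

-- B computes the same species→weight table by dedup-then-per-species-sum instead of A's single-pass dict accumulation (alternative decomposition, same values and order).


-- ===== PORT A =====
-- for m, w in zip(...): sp = m["species"]; species_weights[sp] = species_weights.get(sp, 0) + w
-- (the KeyError case — no "species" key — is excluded by Pre_; the match's none branch is never taken there)
def aggregate_weighted_species (mons : List (List (String × String))) (slot_weights : List Int) : List (String × Int) :=
  if mons.length ≠ slot_weights.length then []   -- Python raises ValueError here; excluded by Pre_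
  else
    ((mons.zip slot_weights).foldl
      (fun (d : PySem.Dict String Int) p =>
        match (PySem.Dict.mk p.1).get? "species" with
        | some sp => d.insert sp (d.getD sp 0 + p.2)
        | none => d)
      PySem.Dict.empty).items

-- ===== PORT B =====
-- species = [m["species"] for m in mons]; {sp: sum(w for s,w in zip(species, slot_weights) if s == sp) for sp in dict.fromkeys(species)}
def aggregate_weighted_species_alt (mons : List (List (String × String))) (slot_weights : List Int) : List (String × Int) :=
  if mons.length ≠ slot_weights.length then []   -- Python raises ValueError here; excluded by Pre_
  else
    let species := mons.map (fun m => ((PySem.Dict.mk m).get? "species").getD "")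
    (PySem.List.dedup species).map
      (fun sp => (sp, (((species.zip slot_weights).filter (fun p => p.1 == sp)).map (·.2)).sum))

-- ===== PRECONDITION & SPEC =====
-- Pre_ = exactly where the Python A returns: matching lengths (else ValueError) and every mon has a "species" key (else KeyError).
def Pre_aggregate_weighted_species (mons : List (List (String × String))) (slot_weights : List Int) : Prop :=
  mons.length = slot_weights.length ∧ ∀ m ∈ mons, "species" ∈ m.map (·.1)
instance (mons : List (List (String × String))) (slot_weights : List Int) : Decidable (Pre_aggregate_weighted_species mons slot_weights) := by unfold Pre_aggregate_weighted_species; infer_instance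

def pvWitness_aggregate_weighted_species : (List (List (String × String))) × List Int :=
  ([[("species", "a")], [("species", "b")], [("species", "a")]], [10, 20, 5])

def Spec_aggregate_weighted_species (mons : List (List (String × String))) (slot_weights : List Int) (out : List (String × Int)) : Prop := out = aggregate_weighted_species_alt mons slot_weights
instance (mons : List (List (String × String))) (slot_weights : List Int) (out : List (String × Int)) : Decidable (Spec_aggregate_weighted_species mons slot_weights out) := by unfold Spec_aggregate_weighted_species; infer_instance

-- ===== CLAIM (what is proved, stated in full; the proofs are below) =====
def Claim_equal_aggregate_weighted_species : Prop := ∀ (mons : List (List (String × String))) (slot_weights : List Int), Dom_aggregate_weighted_species mons slot_weights → Pre_aggregate_weighted_species mons slot_weights → Spec_aggregate_weighted_species mons slot_weights (aggregate_weighted_species mons slot_weights)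

-- ===== LEMMAS AND PROOFS =====

-- A's accumulated total for one species = B's per-species filtered sum, over any pair list.
theorem getD_foldl_insert_key_add {α : Type} (key : α → String)
    (l : List (α × Int)) (d : PySem.Dict String Int) (sp : String) :
    (l.foldl (fun d p => d.insert (key p.1) (d.getD (key p.1) 0 + p.2)) d).getD sp 0
      = d.getD sp 0 + ((l.filter (fun p => key p.1 == sp)).map (·.2)).sum := by
  induction l generalizing d with
  | nil => simp
  | cons p t ih =>
    simp only [List.foldl_cons, List.filter_cons, ih]
    by_cases h : key p.1 = sp
    · subst h
      simp [PySem.Dict.getD_insert_self]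
      ring
    · have hb : (key p.1 == sp) = false := by simp [h]
      simp [hb]
      exact PySem.Dict.getD_insert_of_ne _ _ _ (Ne.symm h)

theorem aggregate_weighted_species_spec_aux (mons : List (List (String × String))) (slot_weights : List Int)
    (hlen : mons.length = slot_weights.length)
    (hkey : ∀ m ∈ mons, "species" ∈ m.map (·.1)) :
    aggregate_weighted_species mons slot_weights = aggregate_weighted_species_alt mons slot_weights := by
  unfold aggregate_weighted_species aggregate_weighted_species_alt
  simp only [hlen, ne_eq, not_true_eq_false, if_false]
  set key : List (String × String) → String := fun m => ((PySem.Dict.mk m).get? "species").getD "" with hkeydef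
  -- under Pre_, the lookup in A's loop body always succeeds: replace the match by a plain insert
  have hstep : (mons.zip slot_weights).foldl
      (fun (d : PySem.Dict String Int) p =>
        match (PySem.Dict.mk p.1).get? "species" with
        | some sp => d.insert sp (d.getD sp 0 + p.2)
        | none => d) PySem.Dict.empty
      = (mons.zip slot_weights).foldl
          (fun d p => d.insert (key p.1) (d.getD (key p.1) 0 + p.2)) PySem.Dict.empty := by
    apply PySem.List.foldl_congr_mem
    intro acc p hp
    obtain ⟨m, w⟩ := p
    have hm : m ∈ mons := (List.of_mem_zip hp).1
    cases hv : (PySem.Dict.mk m).get? "species" with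
    | none =>
        exact absurd (by simpa [PySem.Dict.keys] using hkey _ hm)
          ((PySem.Dict.get?_eq_none_iff_not_mem_keys _ _).mp hv)
    | some v => simp [hkeydef, hv]
  rw [hstep]
  -- keys of the fold = dedup of the species list, in first-occurrence order
  have hnodup : ((mons.zip slot_weights).foldl
      (fun d p => d.insert (key p.1) (d.getD (key p.1) 0 + p.2)) PySem.Dict.empty).keys.Nodup :=
    PySem.Dict.nodup_keys_foldl_insert_key _ _ _ _ PySem.Dict.nodup_keys_empty
  have hspecies : (mons.zip slot_weights).map (fun p => key p.1) = mons.map key := by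
    show (mons.zip slot_weights).map (key ∘ Prod.fst) = mons.map key
    rw [← List.map_map, List.map_fst_zip (le_of_eq hlen)]
  have hkeys : ((mons.zip slot_weights).foldl
      (fun d p => d.insert (key p.1) (d.getD (key p.1) 0 + p.2)) PySem.Dict.empty).keys
      = PySem.List.dedup (mons.map key) := by
    rw [PySem.Dict.keys_foldl_insert_key]
    simp [PySem.Set.update_nil_left, hspecies]
  rw [PySem.Dict.items_eq_map_keys _ hnodup 0, hkeys]
  apply List.map_congr_left
  intro sp _
  have hzip : (mons.map key).zip slot_weights
      = (mons.zip slot_weights).map (fun p => (key p.1, p.2)) := by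
    rw [List.zip_map_left]
    simp [Prod.map]
  rw [getD_foldl_insert_key_add, hzip]
  simp [PySem.Dict.getD_empty, List.filter_map, List.map_map, Function.comp_def]

-- ===== VERDICT (by name: the statement is the Claim_ definition above) =====
theorem aggregate_weighted_species_spec : Claim_equal_aggregate_weighted_species := by
  intro mons slot_weights _ hpre
  exact aggregate_weighted_species_spec_aux mons slot_weights hpre.1 hpre.2
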